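-- pv_equiv track=rewrite | github.com/Coderedhydra/comic | backend/smart_story_extractor.py | get_adaptive_layout
-- ===== SOURCE A (Python) =====
-- from typing import List, Dict, Tuple
--
-- def get_adaptive_layout(num_panels: int) -> List[Dict]:
--     """Get adaptive page layout based on number of panels
--
--     Returns layout configuration for pages
--     """
--     layouts = []
--
--     if num_panels <= 4:
--         # Single page, 2x2 grid
--         layouts.append({
--             'panels_per_page': 4,
--             'rows': 2,
--             'cols': 2
--         })
--     elif num_panels <= 6:
--         # Single page, 2x3 grid
--         layouts.append({
--             'panels_per_page': 6,
--             'rows': 2,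
--             'cols': 3
--         })
--     elif num_panels <= 9:
--         # Single page, 3x3 grid
--         layouts.append({
--             'panels_per_page': 9,
--             'rows': 3,
--             'cols': 3
--         })
--     elif num_panels <= 12:
--         # Two pages, 2x3 grid each
--         layouts.extend([
--             {'panels_per_page': 6, 'rows': 2, 'cols': 3},
--             {'panels_per_page': 6, 'rows': 2, 'cols': 3}
--         ])
--     else:
--         # Multiple pages with varied layouts
--         remaining = num_panels
--         while remaining > 0:
--             if remaining >= 6:
--                 layouts.append({
--                     'panels_per_page': 6,
--                     'rows': 2,
--                     'cols': 3
--                 })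
--                 remaining -= 6
--             elif remaining >= 4:
--                 layouts.append({
--                     'panels_per_page': 4,
--                     'rows': 2,
--                     'cols': 2
--                 })
--                 remaining -= 4
--             else:
--                 layouts.append({
--                     'panels_per_page': remaining,
--                     'rows': 1,
--                     'cols': remaining
--                 })
--                 remaining = 0
--
--     return layouts
-- ===== SOURCE B (Python) =====
-- def get_adaptive_layout(num_panels):
--     P6 = {'panels_per_page': 6, 'rows': 2, 'cols': 3}
--     P4 = {'panels_per_page': 4, 'rows': 2, 'cols': 2}
--     if num_panels <= 4:
--         return [P4]
--     if num_panels <= 6: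
--         return [P6]
--     if num_panels <= 9:
--         return [{'panels_per_page': 9, 'rows': 3, 'cols': 3}]
--     if num_panels <= 12:
--         return [dict(P6), dict(P6)]
--     full, rem = divmod(num_panels, 6)
--     pages = [dict(P6) for _ in range(full)]
--     if rem in (1, 2, 3):
--         pages.append({'panels_per_page': rem, 'rows': 1, 'cols': rem})
--     elif rem == 4:
--         pages.append(P4)
--     elif rem == 5:
--         pages.append(P4)
--         pages.append({'panels_per_page': 1, 'rows': 1, 'cols': 1})
--     return pages
-- ===== Notes on version B (the rewrite author's own statement) =====
-- stated objective: alternative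
-- what changed: The else-branch greedy subtraction while-loop is replaced by a divmod computation: all full six-panel pages are produced at once by replication and the remainder pages are given in closed form (including the split of a remainder of five into a four-panel page plus a one-panel page).
import Mathlib
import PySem

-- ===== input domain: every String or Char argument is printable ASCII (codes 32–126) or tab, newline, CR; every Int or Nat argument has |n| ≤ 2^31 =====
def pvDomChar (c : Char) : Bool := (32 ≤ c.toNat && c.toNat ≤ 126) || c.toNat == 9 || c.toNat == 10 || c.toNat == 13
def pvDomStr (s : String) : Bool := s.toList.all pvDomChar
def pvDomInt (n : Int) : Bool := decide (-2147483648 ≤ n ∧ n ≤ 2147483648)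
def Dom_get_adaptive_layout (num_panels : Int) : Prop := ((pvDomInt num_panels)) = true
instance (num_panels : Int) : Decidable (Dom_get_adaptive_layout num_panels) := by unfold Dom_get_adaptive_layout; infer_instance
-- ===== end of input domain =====

-- B replaces A's greedy subtraction while-loop by a divmod-based closed-form construction (objective: alternative).

-- page constants shared by both ports
def pvPage6 : List (String × Int) := [("panels_per_page", 6), ("rows", 2), ("cols", 3)]
def pvPage4 : List (String × Int) := [("panels_per_page", 4), ("rows", 2), ("cols", 2)]
def pvPage9 : List (String × Int) := [("panels_per_page", 9), ("rows", 3), ("cols", 3)]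
def pvPage1 : List (String × Int) := [("panels_per_page", 1), ("rows", 1), ("cols", 1)]

-- ===== PORT A =====
-- A's while-loop over `remaining`, accumulating `layouts`
def pvLoopA (remaining : Int) (layouts : List (List (String × Int))) : List (List (String × Int)) :=
  if remaining > 0 then
    if remaining ≥ 6 then pvLoopA (remaining - 6) (layouts ++ [pvPage6])
    else if remaining ≥ 4 then pvLoopA (remaining - 4) (layouts ++ [pvPage4])
    else layouts ++ [[("panels_per_page", remaining), ("rows", 1), ("cols", remaining)]]
  else layouts
termination_by remaining.toNat
decreasing_by all_goals omega

def get_adaptive_layout (num_panels : Int) : List (List (String × Int)) :=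
  if num_panels ≤ 4 then [pvPage4]
  else if num_panels ≤ 6 then [pvPage6]
  else if num_panels ≤ 9 then [pvPage9]
  else if num_panels ≤ 12 then [pvPage6, pvPage6]
  else pvLoopA num_panels []

-- ===== PORT B =====
def get_adaptive_layout_alt (num_panels : Int) : List (List (String × Int)) :=
  if num_panels ≤ 4 then [pvPage4]
  else if num_panels ≤ 6 then [pvPage6]
  else if num_panels ≤ 9 then [pvPage9]
  else if num_panels ≤ 12 then [pvPage6, pvPage6]
  else
    let full := PySem.Int.floordiv num_panels 6
    let rem := PySem.Int.mod num_panels 6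
    List.replicate full.toNat pvPage6 ++
      (if rem = 1 ∨ rem = 2 ∨ rem = 3 then
        [[("panels_per_page", rem), ("rows", 1), ("cols", rem)]]
      else if rem = 4 then [pvPage4]
      else if rem = 5 then [pvPage4, pvPage1]
      else [])

-- ===== PRECONDITION & SPEC =====
def Spec_get_adaptive_layout (num_panels : Int) (out : List (List (String × Int))) : Prop := out = get_adaptive_layout_alt num_panels
instance (num_panels : Int) (out : List (List (String × Int))) : Decidable (Spec_get_adaptive_layout num_panels out) := by unfold Spec_get_adaptive_layout; infer_instance

-- ===== CLAIM (what is proved, stated in full; the proofs are below) =====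
def Claim_equal_get_adaptive_layout : Prop := ∀ (num_panels : Int), Dom_get_adaptive_layout num_panels → Spec_get_adaptive_layout num_panels (get_adaptive_layout num_panels)

-- ===== LEMMAS AND PROOFS =====

-- the remainder pages B appends, as a function of rem = n % 6
def pvTail (rem : Int) : List (List (String × Int)) :=
  if rem = 1 ∨ rem = 2 ∨ rem = 3 then
    [[("panels_per_page", rem), ("rows", 1), ("cols", rem)]]
  else if rem = 4 then [pvPage4]
  else if rem = 5 then [pvPage4, pvPage1]
  else []

theorem pvLoopA_spec (k : Nat) (r : Int) (acc : List (List (String × Int)))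
    (hk : r.toNat ≤ k) (hr : 0 ≤ r) :
    pvLoopA r acc = acc ++ (List.replicate (PySem.Int.floordiv r 6).toNat pvPage6 ++ pvTail (PySem.Int.mod r 6)) := by
  induction k generalizing r acc with
  | zero =>
    have : r = 0 := by omega
    subst this
    rw [pvLoopA]
    simp [pvTail, PySem.Int.floordiv, PySem.Int.mod]
  | succ k ih =>
    rw [pvLoopA]
    by_cases h6 : r ≥ 6
    · have hpos : r > 0 := by omega
      rw [if_pos hpos, if_pos h6, ih (r - 6) _ (by omega) (by omega)]
      have hd : PySem.Int.floordiv r 6 = PySem.Int.floordiv (r - 6) 6 + 1 := by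
        rw [PySem.Int.floordiv_eq_ediv_of_pos (by omega), PySem.Int.floordiv_eq_ediv_of_pos (by omega)]
        omega
      have hm : PySem.Int.mod r 6 = PySem.Int.mod (r - 6) 6 := by
        rw [PySem.Int.mod_eq_emod_of_pos (by omega), PySem.Int.mod_eq_emod_of_pos (by omega)]
        omega
      have hfd : 0 ≤ PySem.Int.floordiv (r - 6) 6 := by
        rw [PySem.Int.floordiv_eq_ediv_of_pos (by omega)]; exact Int.ediv_nonneg (by omega) (by omega)
      rw [hd, hm]
      have : (PySem.Int.floordiv (r - 6) 6 + 1).toNat = (PySem.Int.floordiv (r - 6) 6).toNat + 1 := by omega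
      rw [this, List.replicate_succ]
      simp
    · -- r < 6 : base cases, floordiv r 6 = 0, mod r 6 = r
      have hd : PySem.Int.floordiv r 6 = 0 := by
        rw [PySem.Int.floordiv_eq_ediv_of_pos (by omega)]; omega
      have hm : PySem.Int.mod r 6 = r := by
        rw [PySem.Int.mod_eq_emod_of_pos (by omega)]; omega
      rw [hd, hm]
      simp only [Int.toNat_zero, List.replicate_zero, List.nil_append]
      by_cases h0 : r > 0
      · rw [if_pos h0, if_neg h6]
        by_cases h4 : r ≥ 4
        · rw [if_pos h4]
          -- r = 4 or r = 5
          rw [ih (r - 4) _ (by omega) (by omega)]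
          have hd' : PySem.Int.floordiv (r - 4) 6 = 0 := by
            rw [PySem.Int.floordiv_eq_ediv_of_pos (by omega)]; omega
          have hm' : PySem.Int.mod (r - 4) 6 = r - 4 := by
            rw [PySem.Int.mod_eq_emod_of_pos (by omega)]; omega
          rw [hd', hm']
          interval_cases r
          · simp [pvTail]
          · simp [pvTail, pvPage1]
        · rw [if_neg h4]
          interval_cases r <;> simp [pvTail]
      · have : r = 0 := by omega
        subst this
        simp [pvTail]

-- ===== VERDICT (by name: the statement is the Claim_ definition above) =====
theorem get_adaptive_layout_spec : Claim_equal_get_adaptive_layout := by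
  intro n _
  unfold Spec_get_adaptive_layout get_adaptive_layout get_adaptive_layout_alt
  split_ifs with h1 h2 h3 h4 <;> try rfl
  rw [pvLoopA_spec n.toNat n [] (le_refl _) (by omega)]
  simp [pvTail]
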